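-- pv_equiv track=rewrite | github.com/lcsig/Sequence-Searcher | search_engine/seq_calc.py | seq_adjacent_terms_diff
-- ===== SOURCE A (Python) =====
-- def seq_adjacent_terms_diff(sequence: list, diff_level: int):
--     """
--     A function to extract the difference of adjacent terms
--     sequence: A list of integers that contains the sequence
--     diff_level: The level indicates the number of times the operation will be applied on the sequence
--     return: A list of list of integers that contains the sequence after extracting the differences
--     """
--     seq = sequence
--     list_ret = [[0]] * diff_level
--
--     for idx in range(0, diff_level):
--         diff_seq = [0] * (len(seq) - 1)
--         for n in range(1, len(seq)):
--             diff_seq[n - 1] = seq[n] - seq[n - 1]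
--
--         list_ret[idx] = diff_seq
--         seq = diff_seq
--
--     return list_ret
-- ===== SOURCE B (Python) =====
-- def seq_adjacent_terms_diff(sequence: list, diff_level: int):
--     """Each difference level is computed directly from the ORIGINAL sequence via
--     signed binomial coefficients (finite-difference formula), instead of chaining
--     each level off the previous one."""
--     result = []
--     for idx in range(diff_level):
--         m = idx + 1
--         if len(sequence) <= m:
--             # no window of m+1 adjacent terms exists: this level is empty
--             result.append([])
--             continue
--         # Pascal row [C(m,0), ..., C(m,m)], built from scratch for this level
--         row = [1]
--         for _ in range(m):
--             row = [1] + [row[k] + row[k + 1] for k in range(len(row) - 1)] + [1]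
--         result.append([
--             sum((-1) ** (m - j) * row[j] * sequence[i + j] for j in range(m + 1))
--             for i in range(len(sequence) - m)
--         ])
--     return result
-- ===== Notes on version B (the rewrite author's own statement) =====
-- stated objective: alternative
-- what changed: Instead of chaining each difference level off the previous one with an index-assignment loop, B computes every level independently from the original sequence using the finite-difference closed form with signed Pascal-row (binomial) coefficients built per level.
import Mathlib
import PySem

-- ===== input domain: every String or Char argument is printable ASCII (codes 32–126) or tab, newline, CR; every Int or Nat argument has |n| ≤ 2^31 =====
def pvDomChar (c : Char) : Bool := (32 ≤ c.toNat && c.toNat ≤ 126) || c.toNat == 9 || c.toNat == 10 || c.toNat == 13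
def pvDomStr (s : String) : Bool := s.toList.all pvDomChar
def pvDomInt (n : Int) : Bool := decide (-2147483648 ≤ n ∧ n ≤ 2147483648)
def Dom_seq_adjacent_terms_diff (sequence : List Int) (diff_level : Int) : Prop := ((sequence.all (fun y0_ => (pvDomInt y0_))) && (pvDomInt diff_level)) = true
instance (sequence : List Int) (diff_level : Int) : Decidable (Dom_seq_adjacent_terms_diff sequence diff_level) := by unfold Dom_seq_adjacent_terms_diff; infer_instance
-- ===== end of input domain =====

-- B recomputes every difference level directly from the ORIGINAL sequence via signed
-- binomial (finite-difference) coefficients instead of chaining each level off the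
-- previous one (objective: alternative algorithm, same results, no speed claim).

-- ===== PORT A =====
def seq_adjacent_terms_diff (sequence : List Int) (diff_level : Int) : List (List Int) :=
  let seq := sequence
  let list_ret : List (List Int) := List.replicate diff_level.toNat [0]
  let st := (PySem.List.pyRange 0 diff_level 1).foldl
    (fun (st : List (List Int) × List Int) idx =>
      let seq := st.2
      let diff_seq := (PySem.List.pyRange 1 (seq.length : Int) 1).foldl
        (fun ds n => ds.set (n - 1).toNat
          (PySem.List.pyGetD seq n 0 - PySem.List.pyGetD seq (n - 1) 0))
        (List.replicate ((seq.length : Int) - 1).toNat 0)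
      (st.1.set idx.toNat diff_seq, diff_seq))
    (list_ret, seq)
  st.1

-- ===== PORT B =====
def pvPascalStep (row : List Int) : List Int :=
  [1] ++ (List.range (row.length - 1)).map (fun k => row.getD k 0 + row.getD (k + 1) 0) ++ [1]

def seq_adjacent_terms_diff_alt (sequence : List Int) (diff_level : Int) : List (List Int) :=
  (PySem.List.pyRange 0 diff_level 1).map (fun idx =>
    let m := idx + 1
    if (sequence.length : Int) ≤ m then [] else
    let row := (PySem.List.pyRange 0 m 1).foldl (fun r _ => pvPascalStep r) [1]
    (PySem.List.pyRange 0 ((sequence.length : Int) - m) 1).map (fun i =>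
      ((PySem.List.pyRange 0 (m + 1) 1).map (fun j =>
        (-1 : Int) ^ (m - j).toNat * PySem.List.pyGetD row j 0 *
          PySem.List.pyGetD sequence (i + j) 0)).sum))

-- ===== PRECONDITION & SPEC =====
def Spec_seq_adjacent_terms_diff (sequence : List Int) (diff_level : Int) (out : List (List Int)) : Prop := out = seq_adjacent_terms_diff_alt sequence diff_level
instance (sequence : List Int) (diff_level : Int) (out : List (List Int)) : Decidable (Spec_seq_adjacent_terms_diff sequence diff_level out) := by unfold Spec_seq_adjacent_terms_diff; infer_instance

-- ===== CLAIM (what is proved, stated in full; the proofs are below) =====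
def Claim_equal_seq_adjacent_terms_diff : Prop := ∀ (sequence : List Int) (diff_level : Int), Dom_seq_adjacent_terms_diff sequence diff_level → Spec_seq_adjacent_terms_diff sequence diff_level (seq_adjacent_terms_diff sequence diff_level)

-- ===== LEMMAS AND PROOFS =====
lemma pv_set_map_range {α : Type} (g : Nat → α) (n t : Nat) (v : α) :
    ((List.range n).map g).set t v = (List.range n).map (fun p => if p = t then v else g p) := by
  apply List.ext_getElem
  · simp
  · intro i h1 h2
    simp only [List.getElem_set, List.getElem_map, List.getElem_range]
    by_cases h : t = i
    · subst h; simp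
    · have h' : ¬ i = t := fun hh => h hh.symm
      rw [if_neg h, if_neg h']

lemma pv_foldl_range_set (f : Nat → Int) (n : Nat) :
    ∀ t, t ≤ n →
    (List.range t).foldl (fun ds k => ds.set k (f k)) ((List.range n).map (fun _ => (0:Int)))
      = (List.range n).map (fun p => if p < t then f p else 0) := by
  intro t
  induction t with
  | zero => intro _; simp
  | succ t ih =>
    intro ht
    rw [List.range_succ, List.foldl_append, ih (by omega)]
    simp only [List.foldl_cons, List.foldl_nil]
    rw [pv_set_map_range]
    apply List.map_congr_left
    intro p hp
    by_cases hpt : p = t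
    · subst hpt; simp
    · simp only [if_neg hpt]
      split_ifs <;> first | rfl | omega

def pvDstep (xs : List Int) : List Int :=
  (List.range (xs.length - 1)).map (fun p => xs.getD (p + 1) 0 - xs.getD p 0)

lemma pv_inner_eq (seq : List Int) :
    (PySem.List.pyRange 1 (seq.length : Int) 1).foldl
      (fun ds n => ds.set (n - 1).toNat
        (PySem.List.pyGetD seq n 0 - PySem.List.pyGetD seq (n - 1) 0))
      (List.replicate ((seq.length : Int) - 1).toNat 0)
    = pvDstep seq := by
  have hT : ((seq.length : Int) - 1).toNat = seq.length - 1 := by omega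
  have hrep : List.replicate ((seq.length : Int) - 1).toNat (0:Int)
      = (List.range (seq.length - 1)).map (fun _ => (0:Int)) := by
    rw [hT, List.map_const', List.length_range]
  have hbody : ∀ (ds : List Int) (k : Nat),
      ds.set ((1 + (k:Int)) - 1).toNat
        (PySem.List.pyGetD seq (1 + (k:Int)) 0 - PySem.List.pyGetD seq ((1 + (k:Int)) - 1) 0)
      = ds.set k (seq.getD (k+1) 0 - seq.getD k 0) := by
    intro ds k
    have h1 : (1 + (k:Int)) = ((k+1 : Nat) : Int) := by push_cast; ring
    have h2 : ((1 + (k:Int)) - 1) = ((k : Nat) : Int) := by omega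
    rw [h2, h1, PySem.List.pyGetD_natCast, PySem.List.pyGetD_natCast, Int.toNat_natCast]
  rw [PySem.List.pyRange_one, List.foldl_map]
  simp only [hbody]
  rw [hrep, hT, pv_foldl_range_set _ _ _ (le_refl _)]
  unfold pvDstep
  exact List.map_congr_left (fun p hp => by rw [if_pos (List.mem_range.mp hp)])

lemma pv_outer (xs : List Int) (D : Nat) :
    ∀ t, t ≤ D →
    (List.range t).foldl
        (fun (st : List (List Int) × List Int) k => (st.1.set k (pvDstep st.2), pvDstep st.2))
        (List.replicate D ([0] : List Int), xs)
      = ((List.range D).map (fun p => if p < t then pvDstep^[p+1] xs else [0]), pvDstep^[t] xs) := by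
  intro t
  induction t with
  | zero =>
    intro _
    have h0 : ((List.range D).map (fun p => if p < 0 then pvDstep^[p+1] xs else [0]))
        = List.replicate D ([0] : List Int) := by
      rw [List.map_congr_left (fun p _ => if_neg (Nat.not_lt_zero p)),
        List.map_const', List.length_range]
    simp only [List.range_zero, List.foldl_nil, Function.iterate_zero_apply]
    exact Prod.ext h0.symm rfl
  | succ t ih =>
    intro ht
    rw [List.range_succ, List.foldl_append, ih (by omega)]
    simp only [List.foldl_cons, List.foldl_nil]
    refine Prod.ext ?_ ?_
    · show ((List.range D).map (fun p => if p < t then pvDstep^[p+1] xs else [0])).set t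
          (pvDstep (pvDstep^[t] xs)) = _
      rw [pv_set_map_range]
      apply List.map_congr_left
      intro p hp
      by_cases hpt : p = t
      · subst hpt
        rw [if_pos rfl, if_pos (by omega)]
        exact (Function.iterate_succ_apply' _ _ _).symm
      · rw [if_neg hpt]
        split_ifs with h1 h2 <;> first | rfl | omega
    · show pvDstep (pvDstep^[t] xs) = pvDstep^[t+1] xs
      exact (Function.iterate_succ_apply' _ _ _).symm

lemma pv_A_eq (sequence : List Int) (diff_level : Int) :
    seq_adjacent_terms_diff sequence diff_level
      = (List.range diff_level.toNat).map (fun p => pvDstep^[p+1] sequence) := by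
  unfold seq_adjacent_terms_diff
  simp only [pv_inner_eq]
  rw [PySem.List.pyRange_one, List.foldl_map]
  have hD : ((diff_level : Int) - 0).toNat = diff_level.toNat := by omega
  have hbody : ∀ (st : List (List Int) × List Int) (k : Nat),
      (st.1.set ((0:Int) + (k:Int)).toNat (pvDstep st.2), pvDstep st.2)
      = (st.1.set k (pvDstep st.2), pvDstep st.2) := by
    intro st k
    have : ((0:Int) + (k:Int)).toNat = k := by omega
    rw [this]
  simp only [hbody, hD]
  rw [pv_outer sequence diff_level.toNat diff_level.toNat (le_refl _)]
  exact List.map_congr_left (fun p hp => by rw [if_pos (List.mem_range.mp hp)])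


def pvSgen (a : Nat → Int) (m p : Nat) : Int :=
  ∑ j ∈ Finset.range (m+1), (-1:Int)^(m-j) * (Nat.choose m j : Int) * a (p+j)

lemma pv_core (a : Nat → Int) (m p : Nat) :
    pvSgen a (m+1) p = pvSgen a m (p+1) - pvSgen a m p := by
  unfold pvSgen
  rw [Finset.sum_range_succ' (fun j => (-1:Int)^(m+1-j) * (Nat.choose (m+1) j : Int) * a (p+j))]
  have hsplit : ∀ j ∈ Finset.range (m+1),
      (-1:Int)^(m+1-(j+1)) * (Nat.choose (m+1) (j+1) : Int) * a (p+(j+1))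
      = (-1:Int)^(m-j) * (Nat.choose m j : Int) * a ((p+1)+j)
        + (-1:Int)^(m-j) * (Nat.choose m (j+1) : Int) * a (p+(j+1)) := by
    intro j hj
    have h1 : m+1-(j+1) = m-j := by omega
    have h2 : p+(j+1) = (p+1)+j := by omega
    rw [h1, h2, Nat.choose_succ_succ]
    push_cast
    ring
  rw [Finset.sum_congr rfl hsplit, Finset.sum_add_distrib]
  have hlast : ∑ j ∈ Finset.range (m+1), (-1:Int)^(m-j) * (Nat.choose m (j+1) : Int) * a (p+(j+1))
      = ∑ j ∈ Finset.range m, (-1:Int)^(m-j) * (Nat.choose m (j+1) : Int) * a (p+(j+1)) := by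
    rw [Finset.sum_range_succ]
    simp [Nat.choose_succ_self]
  have hS : ∑ j ∈ Finset.range (m+1), (-1:Int)^(m-j) * (Nat.choose m j : Int) * a (p+j)
      = (∑ j ∈ Finset.range m, (-1:Int)^(m-(j+1)) * (Nat.choose m (j+1) : Int) * a (p+(j+1)))
        + (-1:Int)^m * (Nat.choose m 0 : Int) * a p := by
    rw [Finset.sum_range_succ' (fun j => (-1:Int)^(m-j) * (Nat.choose m j : Int) * a (p+j))]
    simp
  have hneg : ∑ j ∈ Finset.range m, (-1:Int)^(m-j) * (Nat.choose m (j+1) : Int) * a (p+(j+1))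
      = -∑ j ∈ Finset.range m, (-1:Int)^(m-(j+1)) * (Nat.choose m (j+1) : Int) * a (p+(j+1)) := by
    rw [← Finset.sum_neg_distrib]
    apply Finset.sum_congr rfl
    intro j hj
    have : m - j = (m-(j+1)) + 1 := by
      have := Finset.mem_range.mp hj; omega
    rw [this, pow_succ]
    ring
  rw [hlast, hS, hneg]
  simp [pow_succ]
  ring

def pvBin (xs : List Int) (m : Nat) : List Int :=
  (List.range (xs.length - m)).map (fun i => pvSgen (fun q => xs.getD q 0) m i)

lemma pv_bin_zero (xs : List Int) : pvBin xs 0 = xs := by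
  unfold pvBin pvSgen
  apply List.ext_getElem
  · simp
  · intro i h1 h2
    simp [List.getD_eq_getElem?_getD, List.getElem?_eq_getElem h2]

lemma pv_dstep_bin (xs : List Int) (m : Nat) : pvDstep (pvBin xs m) = pvBin xs (m+1) := by
  unfold pvDstep
  have hlen : (pvBin xs m).length = xs.length - m := by unfold pvBin; simp
  rw [hlen]
  have hT : xs.length - m - 1 = xs.length - (m+1) := by omega
  rw [hT]
  unfold pvBin
  apply List.map_congr_left
  intro p hp
  have hp' := List.mem_range.mp hp
  rw [PySem.List.getD_map_range _ _ _ _ (by omega), PySem.List.getD_map_range _ _ _ _ (by omega)]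
  have := pv_core (fun q => xs.getD q 0) m p
  rw [← this]

lemma pv_iter_bin (xs : List Int) : ∀ m, pvDstep^[m] xs = pvBin xs m := by
  intro m
  induction m with
  | zero => simp [pv_bin_zero]
  | succ m ih => rw [Function.iterate_succ_apply', ih, pv_dstep_bin]

lemma pv_row : ∀ m, pvPascalStep^[m] ([1] : List Int) = (List.range (m+1)).map (fun j => (Nat.choose m j : Int)) := by
  intro m
  induction m with
  | zero => rfl
  | succ m ih =>
    rw [Function.iterate_succ_apply', ih]
    unfold pvPascalStep
    have hlen : ((List.range (m+1)).map (fun j => (Nat.choose m j : Int))).length = m + 1 := by simp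
    rw [hlen]
    have h1 : m + 1 - 1 = m := by omega
    rw [h1]
    have hmid : (List.range m).map (fun k =>
        ((List.range (m+1)).map (fun j => (Nat.choose m j : Int))).getD k 0
        + ((List.range (m+1)).map (fun j => (Nat.choose m j : Int))).getD (k+1) 0)
        = (List.range m).map (fun k => (Nat.choose (m+1) (k+1) : Int)) := by
      apply List.map_congr_left
      intro k hk
      have hk' := List.mem_range.mp hk
      rw [PySem.List.getD_map_range _ _ _ _ (by omega), PySem.List.getD_map_range _ _ _ _ (by omega)]
      rw [Nat.choose_succ_succ]
      push_cast
      ring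
    rw [hmid]
    rw [List.range_succ_eq_map, List.range_succ]
    simp [Nat.choose_self]

lemma pv_B_eq (sequence : List Int) (diff_level : Int) :
    seq_adjacent_terms_diff_alt sequence diff_level
      = (List.range diff_level.toNat).map (fun k => pvBin sequence (k+1)) := by
  unfold seq_adjacent_terms_diff_alt
  rw [PySem.List.pyRange_one, List.map_map]
  have hD : ((diff_level : Int) - 0).toNat = diff_level.toNat := by omega
  rw [hD]
  apply List.map_congr_left
  intro k _
  have hm : (0:Int) + (k:Int) + 1 = ((k+1 : Nat) : Int) := by push_cast; ring
  by_cases hle : (sequence.length : Int) ≤ (0:Int) + (k:Int) + 1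
  · show (if (sequence.length : Int) ≤ (0:Int)+(k:Int)+1 then ([] : List Int) else _) = _
    rw [if_pos hle]
    unfold pvBin
    have h0 : sequence.length - (k+1) = 0 := by omega
    rw [h0]
    rfl
  · show (if (sequence.length : Int) ≤ (0:Int)+(k:Int)+1 then ([] : List Int) else _) = _
    rw [if_neg hle]
    show (PySem.List.pyRange 0 ((sequence.length : Int) - ((0:Int)+(k:Int) + 1)) 1).map _ = _
    rw [hm]
    -- the Pascal row
    have hrowfold : (PySem.List.pyRange 0 (((k+1:Nat)):Int) 1).foldl
        (fun r _ => pvPascalStep r) ([1] : List Int)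
        = (List.range (k+2)).map (fun j => (Nat.choose (k+1) j : Int)) := by
      rw [PySem.List.pyRange_one, List.foldl_map, List.foldl_const, List.length_range]
      have : ((((k+1:Nat)):Int) - 0).toNat = k + 1 := by omega
      rw [this, pv_row]
    rw [hrowfold]
    rw [PySem.List.pyRange_one 0 ((sequence.length : Int) - ((k+1:Nat):Int)), List.map_map]
    have hT : (((sequence.length : Int) - ((k+1:Nat):Int)) - 0).toNat = sequence.length - (k+1) := by
      omega
    rw [hT]
    unfold pvBin
    apply List.map_congr_left
    intro i hi
    have hi' := List.mem_range.mp hi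
    show ((PySem.List.pyRange 0 (((k+1:Nat):Int) + 1) 1).map _).sum = _
    have h2 : ((k+1:Nat):Int) + 1 = ((k+2:Nat):Int) := by omega
    rw [h2, PySem.List.pyRange_one 0 ((k+2:Nat):Int), List.map_map]
    have hT2 : (((k+2:Nat):Int) - 0).toNat = k + 2 := by omega
    rw [hT2]
    have hentry : ∀ j ∈ List.range (k+2),
        ((fun jj => (-1:Int) ^ (((k+1:Nat):Int) - jj).toNat
            * PySem.List.pyGetD ((List.range (k+2)).map (fun j => (Nat.choose (k+1) j : Int))) jj 0
            * PySem.List.pyGetD sequence ((0:Int) + (i:Int) + jj) 0) ∘ (fun (j : Nat) => (0:Int) + (j:Int))) j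
        = (-1:Int) ^ ((k+1) - j) * (Nat.choose (k+1) j : Int) * sequence.getD (i+j) 0 := by
      intro j hj
      have hj' := List.mem_range.mp hj
      show (-1:Int) ^ (((k+1:Nat):Int) - ((0:Int)+(j:Int))).toNat
          * PySem.List.pyGetD ((List.range (k+2)).map (fun j => (Nat.choose (k+1) j : Int))) ((0:Int)+(j:Int)) 0
          * PySem.List.pyGetD sequence ((0:Int) + (i:Int) + ((0:Int)+(j:Int))) 0 = _
      have e1 : (((k+1:Nat):Int) - ((0:Int)+(j:Int))).toNat = (k+1) - j := by omega
      have e2 : (0:Int)+(j:Int) = ((j:Nat):Int) := by omega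
      have e3 : (0:Int) + (i:Int) + ((0:Int)+(j:Int)) = ((i+j : Nat):Int) := by push_cast; ring
      rw [e1, e3, PySem.List.pyGetD_natCast, e2, PySem.List.pyGetD_natCast]
      rw [PySem.List.getD_map_range _ _ _ _ (by omega)]
    rw [List.map_congr_left hentry]
    rfl

-- ===== VERDICT (by name: the statement is the Claim_ definition above) =====
theorem seq_adjacent_terms_diff_spec : Claim_equal_seq_adjacent_terms_diff := by
  intro sequence diff_level _
  unfold Spec_seq_adjacent_terms_diff
  rw [pv_A_eq, pv_B_eq]
  exact List.map_congr_left (fun p _ => pv_iter_bin sequence (p+1))
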